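-- pv_equiv track=rewrite | github.com/JungDayoon/AlgorithmStudy | Programmers/[49995] 쿠키 구입/n__aj22/49995.py | solution
-- ===== SOURCE A (Python) =====
-- def solution(cookie):
--     answer = -1
--
--     sum_list = []
--     for i in range(len(cookie)+1):
--         sum_list.append(sum(cookie[0:i]))
--
--     half_sum = sum_list[-1]//2
--
--     for m in range(len(cookie)):
--         for l in range(m+1):
--             #l~m
--             now_sum = sum_list[m+1]-sum_list[l]
--             last_sum = sum_list[len(cookie)] - sum_list[m+1]
--             if now_sum>last_sum: # 남은 쿠키 개수보다 현재 확인할 합계가 작으면 확인할 필요 없음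
--                 continue
--             # if now_sum>half_sum: #현재 확인할 합계가 전체 개수의 반틈보다 작으면 확인할 필요 없음
--             #     continue
--             if answer!=-1 and now_sum<answer: #현재 확인할 합계가 현재 찾은 답보다 작으면 확인할 필요 없음
--                 continue
--             for r in range(m+1, len(cookie)):
--                 #m+1 ~ r
--                 check_sum = sum_list[r+1] - sum_list[m+1]
--                 if(check_sum == now_sum):
--                     answer = max(answer, now_sum)
--                     break
--                 elif(check_sum>now_sum):
--                     break
--     if answer == -1:
--         answer = 0
--     return answer
-- ===== SOURCE B (Python) =====
-- def solution(cookie):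
--     n = len(cookie)
--     prefix = [0]
--     for x in cookie:
--         prefix.append(prefix[-1] + x)
--     best = -1
--     for m in range(n):
--         # records = strict prefix maxima of the running sums of cookie[m+1:]
--         # (a left sum succeeds in A's inner scan iff it is such a record)
--         records = set()
--         run = 0
--         mx = None
--         for x in cookie[m + 1:]:
--             run += x
--             if mx is None or run > mx:
--                 records.add(run)
--                 mx = run
--         last_sum = prefix[n] - prefix[m + 1]
--         for l in range(m + 1):
--             now = prefix[m + 1] - prefix[l]
--             if now <= last_sum and now in records and now > best:
--                 best = now
--     return 0 if best == -1 else best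
-- ===== Notes on version B (the rewrite author's own statement) =====
-- stated objective: faster
-- what changed: The O(n) inner r-scan per (l,m) pair is replaced by one per-split precomputation of the strict prefix maxima of the right-hand running sums (exactly the left sums that succeed in A's first-crossing scan), stored in a hash set, so each l is answered by an O(1) membership test.
import Mathlib
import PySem

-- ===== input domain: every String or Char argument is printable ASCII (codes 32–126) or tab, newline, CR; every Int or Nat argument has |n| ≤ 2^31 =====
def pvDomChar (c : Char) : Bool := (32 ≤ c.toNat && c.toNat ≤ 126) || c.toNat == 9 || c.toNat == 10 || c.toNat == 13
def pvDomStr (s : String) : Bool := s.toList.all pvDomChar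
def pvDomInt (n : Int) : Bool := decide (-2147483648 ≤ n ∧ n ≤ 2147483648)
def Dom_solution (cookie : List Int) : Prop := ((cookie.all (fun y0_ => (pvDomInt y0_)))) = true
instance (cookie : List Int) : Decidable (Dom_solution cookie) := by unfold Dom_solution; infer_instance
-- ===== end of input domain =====

-- B replaces A's O(n) inner r-scan per (l,m) pair by one per-split set of the strict prefix
-- maxima of the right-hand running sums (exactly the left sums A's first-crossing scan
-- accepts), so each l costs one membership test.

-- ===== PORT A =====
-- the 'for r in range(m+1, len(cookie))' loop with its two breaks
def aInner (sumList : List Int) (m1 now ans : Int) : List Int → Int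
  | [] => ans
  | r :: rs =>
    let check := PySem.List.pyGetD sumList (r + 1) 0 - PySem.List.pyGetD sumList m1 0
    if check = now then max ans now
    else if check > now then ans
    else aInner sumList m1 now ans rs

def solution (cookie : List Int) : Int :=
  let n : Int := cookie.length
  let sumList := (PySem.List.pyRange 0 (n + 1) 1).foldl
    (fun acc i => acc ++ [(PySem.List.slice cookie (some 0) (some i)).sum]) []
  let _half := PySem.Int.floordiv (PySem.List.pyGetD sumList (-1) 0) 2
  let ans := (PySem.List.pyRange 0 n 1).foldl (fun ans m =>
    (PySem.List.pyRange 0 (m + 1) 1).foldl (fun ans l =>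
      let now := PySem.List.pyGetD sumList (m + 1) 0 - PySem.List.pyGetD sumList l 0
      let last := PySem.List.pyGetD sumList n 0 - PySem.List.pyGetD sumList (m + 1) 0
      if now > last then ans
      else if ans ≠ -1 ∧ now < ans then ans
      else aInner sumList (m + 1) now ans (PySem.List.pyRange (m + 1) n 1)) ans) (-1)
  if ans = -1 then 0 else ans

-- ===== PORT B =====
def solution_alt (cookie : List Int) : Int :=
  let n : Int := cookie.length
  let pref := cookie.foldl (fun acc x => acc ++ [PySem.List.pyGetD acc (-1) 0 + x]) [(0 : Int)]
  let best := (PySem.List.pyRange 0 n 1).foldl (fun best m =>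
    let st := (PySem.List.slice cookie (some (m + 1)) none).foldl
      (fun (st : Int × Option Int × PySem.Set Int) x =>
        let run := st.1 + x
        match st.2.1 with
        | none => (run, some run, PySem.Set.add st.2.2 run)
        | some w => if run > w then (run, some run, PySem.Set.add st.2.2 run) else (run, st.2.1, st.2.2))
      (0, none, PySem.Set.empty)
    let records := st.2.2
    let last := PySem.List.pyGetD pref n 0 - PySem.List.pyGetD pref (m + 1) 0
    (PySem.List.pyRange 0 (m + 1) 1).foldl (fun best l =>
      let now := PySem.List.pyGetD pref (m + 1) 0 - PySem.List.pyGetD pref l 0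
      if now ≤ last ∧ PySem.Set.contains records now ∧ now > best then now else best) best) (-1)
  if best = -1 then 0 else best

-- ===== PRECONDITION & SPEC =====
def Spec_solution (cookie : List Int) (out : Int) : Prop := out = solution_alt cookie
instance (cookie : List Int) (out : Int) : Decidable (Spec_solution cookie out) := by unfold Spec_solution; infer_instance

-- ===== CLAIM (what is proved, stated in full; the proofs are below) =====
def Claim_equal_solution : Prop := ∀ (cookie : List Int), Dom_solution cookie → Spec_solution cookie (solution cookie)

-- ===== LEMMAS AND PROOFS =====

-- the canonical prefix-sum list both programs build
def sumL (cookie : List Int) : List Int :=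
  (List.range (cookie.length + 1)).map (fun k => ((cookie.take k).sum : Int))

-- running sums of a list starting from run
def runsum (run : Int) : List Int → List Int
  | [] => []
  | x :: xs => (run + x) :: runsum (run + x) xs

-- does A's first-crossing scan accept now on this list of check values?
def cMem (now : Int) : List Int → Bool
  | [] => false
  | c :: cs => if c = now then true else if c > now then false else cMem now cs

-- B's record-set fold, expressed on the list of check values
def cFold (mx : Option Int) (recs : PySem.Set Int) : List Int → PySem.Set Int
  | [] => recs
  | c :: cs =>
    match mx with
    | none => cFold (some c) (PySem.Set.add recs c) cs
    | some w => if c > w then cFold (some c) (PySem.Set.add recs c) cs else cFold mx recs cs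

theorem getS (cookie : List Int) (k : Nat) (h : k ≤ cookie.length) :
    PySem.List.pyGetD (sumL cookie) (k : Int) 0 = (cookie.take k).sum := by
  have hk : k < cookie.length + 1 := by omega
  simp [sumL, PySem.List.pyGetD_natCast, List.getD_eq_getElem?_getD, hk]

theorem getS' (cookie : List Int) (i : Int) (h0 : 0 ≤ i) (h1 : i ≤ (cookie.length : Int)) :
    PySem.List.pyGetD (sumL cookie) i 0 = (cookie.take i.toNat).sum := by
  obtain ⟨k, rfl⟩ : ∃ k : Nat, i = (k : Int) := ⟨i.toNat, (Int.toNat_of_nonneg h0).symm⟩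
  rw [Int.toNat_natCast]
  exact getS cookie k (by exact_mod_cast h1)

-- A builds sumL
theorem a_sumlist (cookie : List Int) :
    (PySem.List.pyRange 0 ((cookie.length : Int) + 1) 1).foldl
      (fun acc i => acc ++ [(PySem.List.slice cookie (some 0) (some i)).sum]) []
    = sumL cookie := by
  rw [PySem.List.foldl_append_singleton_eq_map]
  rw [PySem.List.pyRange_one]
  have h : (((cookie.length : Int) + 1) - 0).toNat = cookie.length + 1 := by omega
  rw [h, List.map_map, sumL]
  apply List.map_congr_left
  intro k _
  simp [PySem.List.slice_to_natCast]

-- B builds sumL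
theorem b_pref_fold (xs : List Int) : ∀ (acc : List Int) (s : Int),
    List.foldl (fun acc x => acc ++ [PySem.List.pyGetD acc (-1) 0 + x]) (acc ++ [s]) xs
    = acc ++ [s] ++ runsum s xs := by
  induction xs with
  | nil => intro acc s; simp [runsum]
  | cons x xs ih =>
    intro acc s
    simp only [List.foldl_cons, PySem.List.pyGetD_neg_one_append_singleton]
    have := ih (acc ++ [s]) (s + x)
    rw [this]
    simp [runsum]

theorem runsum_shift (xs : List Int) : ∀ (s : Int),
    runsum s xs = (List.range xs.length).map (fun k => s + (xs.take (k + 1)).sum) := by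
  induction xs with
  | nil => intro s; simp [runsum]
  | cons x xs ih =>
    intro s
    simp only [runsum, List.length_cons, List.range_succ_eq_map, List.map_cons, List.map_map]
    congr 1
    · simp
    · rw [ih (s + x)]
      apply List.map_congr_left
      intro k _
      simp [Function.comp, List.take_succ_cons, add_assoc]

theorem sumL_eq_runsum (cookie : List Int) : sumL cookie = 0 :: runsum 0 cookie := by
  rw [sumL, List.range_succ_eq_map, List.map_cons, List.map_map, runsum_shift]
  congr 1
  apply List.map_congr_left
  intro k _
  simp [Function.comp]

theorem b_pref (cookie : List Int) :
    List.foldl (fun acc x => acc ++ [PySem.List.pyGetD acc (-1) 0 + x]) [(0 : Int)] cookie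
    = sumL cookie := by
  have := b_pref_fold cookie [] 0
  simpa [sumL_eq_runsum] using this

-- the inner scan only depends on the list of check values
theorem aInner_eq_cMem (sl : List Int) (m1 now : Int) : ∀ (rs : List Int) (ans : Int),
    aInner sl m1 now ans rs
    = (if cMem now (rs.map (fun r => PySem.List.pyGetD sl (r + 1) 0 - PySem.List.pyGetD sl m1 0))
       then max ans now else ans) := by
  intro rs
  induction rs with
  | nil => intro ans; simp [aInner, cMem]
  | cons r rs ih =>
    intro ans
    simp only [aInner, List.map_cons, cMem]
    split_ifs with h1 h2 <;> simp_all

-- the check values of A's r-range are the running sums of the right part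
theorem check_vals (cookie : List Int) (C : Int) : ∀ (j k : Nat), k + j = cookie.length →
    (PySem.List.pyRange (k : Int) (cookie.length : Int) 1).map
      (fun r => PySem.List.pyGetD (sumL cookie) (r + 1) 0 - C)
    = runsum ((cookie.take k).sum - C) (cookie.drop k) := by
  intro j
  induction j with
  | zero =>
    intro k hk
    rw [PySem.List.pyRange_one_eq_nil (by omega)]
    rw [List.drop_eq_nil_of_le (by omega)]
    simp [runsum]
  | succ j ih =>
    intro k hk
    have hklt : k < cookie.length := by omega
    rw [PySem.List.pyRange_one_cons (by exact_mod_cast hklt)]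
    rw [List.drop_eq_getElem_cons hklt]
    simp only [List.map_cons, runsum]
    have hcast : ((k : Int) + 1) = (((k + 1 : Nat) : Nat) : Int) := by push_cast; ring
    congr 1
    · rw [hcast, getS cookie (k + 1) (by omega)]
      rw [List.sum_take_succ _ _ hklt]
      ring
    · rw [hcast, ih (k + 1) (by omega)]
      congr 1
      rw [List.sum_take_succ _ _ hklt]
      ring

-- B's state fold computes cFold on the running sums
theorem bfold_runsum (xs : List Int) : ∀ (run : Int) (mx : Option Int) (recs : PySem.Set Int),
    (List.foldl
      (fun (st : Int × Option Int × PySem.Set Int) x =>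
        let run := st.1 + x
        match st.2.1 with
        | none => (run, some run, PySem.Set.add st.2.2 run)
        | some w => if run > w then (run, some run, PySem.Set.add st.2.2 run) else (run, st.2.1, st.2.2))
      (run, mx, recs) xs).2.2
    = cFold mx recs (runsum run xs) := by
  induction xs with
  | nil => intro run mx recs; simp [runsum, cFold]
  | cons x xs ih =>
    intro run mx recs
    simp only [List.foldl_cons, runsum, cFold]
    cases mx with
    | none => exact ih (run + x) (some (run + x)) (PySem.Set.add recs (run + x))
    | some w =>
      by_cases h : run + x > w
      · simp only [h, if_pos]
        exact ih (run + x) (some (run + x)) (PySem.Set.add recs (run + x))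
      · simp only [h, if_false]
        exact ih (run + x) (some w) recs

-- once the running max is ≥ now, now is never added any more
theorem mem_cFold_high (now : Int) : ∀ (cs : List Int) (w : Int) (recs : PySem.Set Int),
    now ≤ w → (now ∈ cFold (some w) recs cs ↔ now ∈ recs) := by
  intro cs
  induction cs with
  | nil => intro w recs _; simp [cFold]
  | cons c cs ih =>
    intro w recs hw
    simp only [cFold]
    by_cases h : c > w
    · simp only [h, if_pos]
      rw [ih c (PySem.Set.add recs c) (by omega)]
      rw [PySem.Set.mem_add]
      constructor
      · rintro (h' | h')
        · exact h'
        · omega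
      · intro h'; exact Or.inl h'
    · simp only [h, if_false]
      exact ih w recs hw

-- membership in the record set = acceptance by the first-crossing scan
theorem mem_cFold (now : Int) : ∀ (cs : List Int) (mx : Option Int) (recs : PySem.Set Int),
    (∀ w, mx = some w → w < now) →
    (now ∈ cFold mx recs cs ↔ (now ∈ recs ∨ cMem now cs = true)) := by
  intro cs
  induction cs with
  | nil => intro mx recs _; simp [cFold, cMem]
  | cons c cs ih =>
    intro mx recs hmx
    rcases lt_trichotomy c now with hc | hc | hc
    · -- c < now : continue scanning
      have hcm : cMem now (c :: cs) = cMem now cs := by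
        simp [cMem, show ¬ (c = now) by omega, show ¬ (c > now) by omega]
      rw [hcm]
      have hne : now ≠ c := by omega
      cases mx with
      | none =>
        simp only [cFold]
        rw [ih (some c) (PySem.Set.add recs c) (by intro w hw; injection hw with h; omega)]
        rw [PySem.Set.mem_add]
        tauto
      | some w =>
        have hw : w < now := hmx w rfl
        simp only [cFold]
        by_cases hcw : c > w
        · simp only [hcw, if_pos]
          rw [ih (some c) (PySem.Set.add recs c) (by intro w' hw'; injection hw' with h; omega)]
          rw [PySem.Set.mem_add]
          tauto
        · simp only [hcw, if_false]
          exact ih (some w) recs hmx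
    · -- c = now : accepted, and now enters the set
      subst hc
      have hcm : cMem c (c :: cs) = true := by simp [cMem]
      rw [hcm]
      have hstep : cFold mx recs (c :: cs) = cFold (some c) (PySem.Set.add recs c) cs := by
        cases mx with
        | none => simp [cFold]
        | some w =>
          have hw : w < c := hmx w rfl
          simp [cFold, hw]
      rw [hstep, mem_cFold_high c cs c _ le_rfl, PySem.Set.mem_add]
      simp
    · -- c > now : rejected, and everything later is > c > now
      have hcm : cMem now (c :: cs) = false := by
        simp [cMem]; omega
      rw [hcm]
      have hstep : cFold mx recs (c :: cs) = cFold (some c) (PySem.Set.add recs c) cs := by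
        cases mx with
        | none => simp [cFold]
        | some w =>
          have hw : w < now := hmx w rfl
          simp [cFold, show c > w by omega]
      rw [hstep, mem_cFold_high now cs c _ (by omega), PySem.Set.mem_add]
      have hne : now ≠ c := by omega
      simp [hne]


-- fold congruence carrying an invariant
theorem foldl_inv_congr {α : Type} (P : Int → Prop) (f g : Int → α → Int) :
    ∀ (xs : List α) (a : Int), P a →
    (∀ b x, x ∈ xs → P b → f b x = g b x ∧ P (f b x)) →
    List.foldl f a xs = List.foldl g a xs ∧ P (List.foldl f a xs) := by
  intro xs
  induction xs with
  | nil => intro a ha _; exact ⟨rfl, ha⟩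
  | cons x xs ih =>
    intro a ha hstep
    obtain ⟨heq, hP⟩ := hstep a x (List.mem_cons_self ..) ha
    simp only [List.foldl_cons]
    rw [← heq]
    exact ih (f a x) hP (fun b y hy hb => hstep b y (List.mem_cons_of_mem _ hy) hb)

-- the per-(l, m) loop bodies agree on states ≥ -1
theorem body_case (now last c : Int) (Q1 Q2 : Prop) [Decidable Q1] [Decidable Q2]
    (hQ : Q1 ↔ Q2) (hc : -1 ≤ c) :
    ((if now > last then c else if c ≠ -1 ∧ now < c then c else if Q1 then max c now else c)
      = (if now ≤ last ∧ Q2 ∧ now > c then now else c))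
    ∧ -1 ≤ (if now > last then c else if c ≠ -1 ∧ now < c then c
            else if Q1 then max c now else c) := by
  by_cases hq : Q1
  · have hq2 : Q2 := hQ.mp hq
    simp only [hq, hq2, if_true, true_and, max_def]
    split_ifs <;> constructor <;> omega
  · have hq2 : ¬ Q2 := fun h => hq (hQ.mpr h)
    simp only [hq, hq2, if_false, false_and, and_false]
    split_ifs <;> constructor <;> omega

-- ===== VERDICT (by name: the statement is the Claim_ definition above) =====
theorem solution_spec : Claim_equal_solution := by
  intro cookie _
  unfold Spec_solution
  simp only [solution, solution_alt, a_sumlist, b_pref]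
  have main :
      List.foldl (fun ans m =>
        List.foldl (fun ans l =>
          if PySem.List.pyGetD (sumL cookie) (m + 1) 0 - PySem.List.pyGetD (sumL cookie) l 0 >
              PySem.List.pyGetD (sumL cookie) (cookie.length : Int) 0 -
                PySem.List.pyGetD (sumL cookie) (m + 1) 0 then ans
          else if ans ≠ -1 ∧
              PySem.List.pyGetD (sumL cookie) (m + 1) 0 - PySem.List.pyGetD (sumL cookie) l 0 < ans then ans
          else aInner (sumL cookie) (m + 1)
            (PySem.List.pyGetD (sumL cookie) (m + 1) 0 - PySem.List.pyGetD (sumL cookie) l 0) ans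
            (PySem.List.pyRange (m + 1) (cookie.length : Int) 1))
          ans (PySem.List.pyRange 0 (m + 1) 1))
        (-1) (PySem.List.pyRange 0 (cookie.length : Int) 1)
      =
      List.foldl (fun best m =>
        List.foldl (fun best l =>
          if PySem.List.pyGetD (sumL cookie) (m + 1) 0 - PySem.List.pyGetD (sumL cookie) l 0 ≤
              PySem.List.pyGetD (sumL cookie) (cookie.length : Int) 0 -
                PySem.List.pyGetD (sumL cookie) (m + 1) 0 ∧
             PySem.Set.contains
              ((PySem.List.slice cookie (some (m + 1)) none).foldl
                (fun (st : Int × Option Int × PySem.Set Int) x =>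
                  let run := st.1 + x
                  match st.2.1 with
                  | none => (run, some run, PySem.Set.add st.2.2 run)
                  | some w => if run > w then (run, some run, PySem.Set.add st.2.2 run)
                              else (run, st.2.1, st.2.2))
                (0, none, PySem.Set.empty)).2.2
              (PySem.List.pyGetD (sumL cookie) (m + 1) 0 - PySem.List.pyGetD (sumL cookie) l 0) ∧
             PySem.List.pyGetD (sumL cookie) (m + 1) 0 - PySem.List.pyGetD (sumL cookie) l 0 > best
          then PySem.List.pyGetD (sumL cookie) (m + 1) 0 - PySem.List.pyGetD (sumL cookie) l 0
          else best)
          best (PySem.List.pyRange 0 (m + 1) 1))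
        (-1) (PySem.List.pyRange 0 (cookie.length : Int) 1) := by
    refine (foldl_inv_congr (fun b => -1 ≤ b) _ _ _ _ (by norm_num) ?_).1
    intro b m hm hb
    obtain ⟨hm0, hmn⟩ := (PySem.List.mem_pyRange_one).1 hm
    have hrec : ∀ now : Int,
        (now ∈ ((PySem.List.slice cookie (some (m + 1)) none).foldl
          (fun (st : Int × Option Int × PySem.Set Int) x =>
            let run := st.1 + x
            match st.2.1 with
            | none => (run, some run, PySem.Set.add st.2.2 run)
            | some w => if run > w then (run, some run, PySem.Set.add st.2.2 run)
                        else (run, st.2.1, st.2.2))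
          (0, none, PySem.Set.empty)).2.2)
        ↔ cMem now (runsum 0 (cookie.drop (m + 1).toNat)) = true := by
      intro now
      rw [bfold_runsum, PySem.List.slice_from _ (by omega)]
      rw [mem_cFold now _ none PySem.Set.empty (by intro w hw; cases hw)]
      simp [PySem.Set.empty]
    have hcond : ∀ now : Int,
        (PySem.Set.contains
          ((PySem.List.slice cookie (some (m + 1)) none).foldl
            (fun (st : Int × Option Int × PySem.Set Int) x =>
              let run := st.1 + x
              match st.2.1 with
              | none => (run, some run, PySem.Set.add st.2.2 run)
              | some w => if run > w then (run, some run, PySem.Set.add st.2.2 run)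
                          else (run, st.2.1, st.2.2))
            (0, none, PySem.Set.empty)).2.2 now = true)
        ↔ cMem now (runsum 0 (cookie.drop (m + 1).toNat)) = true := by
      intro now
      rw [PySem.Set.contains_iff]
      exact hrec now
    have hvals :
        (PySem.List.pyRange (m + 1) (cookie.length : Int) 1).map
          (fun r => PySem.List.pyGetD (sumL cookie) (r + 1) 0 -
                    PySem.List.pyGetD (sumL cookie) (m + 1) 0)
        = runsum 0 (cookie.drop (m + 1).toNat) := by
      have hk : (((m + 1).toNat : Nat) : Int) = m + 1 := Int.toNat_of_nonneg (by omega)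
      have h := check_vals cookie (PySem.List.pyGetD (sumL cookie) (m + 1) 0)
        (cookie.length - (m + 1).toNat) (m + 1).toNat (by omega)
      rw [hk] at h
      have h0 : (cookie.take (m + 1).toNat).sum - PySem.List.pyGetD (sumL cookie) (m + 1) 0 = 0 := by
        rw [getS' cookie (m + 1) (by omega) (by omega)]
        omega
      rw [h0] at h
      exact h
    dsimp only
    refine foldl_inv_congr (fun b => -1 ≤ b) _ _ _ _ hb ?_
    intro c l hl hc
    dsimp only
    have hscan : aInner (sumL cookie) (m + 1)
        (PySem.List.pyGetD (sumL cookie) (m + 1) 0 - PySem.List.pyGetD (sumL cookie) l 0) c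
        (PySem.List.pyRange (m + 1) (cookie.length : Int) 1)
        = (if cMem (PySem.List.pyGetD (sumL cookie) (m + 1) 0 - PySem.List.pyGetD (sumL cookie) l 0)
              (runsum 0 (cookie.drop (m + 1).toNat)) = true
           then max c (PySem.List.pyGetD (sumL cookie) (m + 1) 0 - PySem.List.pyGetD (sumL cookie) l 0)
           else c) := by
      rw [aInner_eq_cMem, hvals]
    rw [hscan]
    exact body_case _ _ c _ _ ((hcond _).symm) hc
  rw [main]
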